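-- pv_equiv track=rewrite | github.com/leejeyeol/LJY_Machine_Learning | Preprocessing/top_view_deduplication.py | is_same_group
-- ===== SOURCE A (Python) =====
-- def is_same_group(meta_group, max_group):
--     check_bool_list = []
--     check_equality = []
--     for group in meta_group:
--         check_bool_list.append(len(group) == max_group)
--     for i in range(max_group):
--         check_list = []
--         for j in range(len(meta_group)):
--             if check_bool_list[j]:
--                 check_list.append(meta_group[j][i])
--         check_equality.append(all(check_list[0] == cl for cl in check_list))
--     return all(check_equality)
-- ===== SOURCE B (Python) =====
-- def is_same_group(meta_group, max_group):
--     full = [g for g in meta_group if len(g) == max_group]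
--     return all(g == full[0] for g in full)
-- ===== Notes on version B (the rewrite author's own statement) =====
-- stated objective: simpler
-- what changed: A transposes: for each column index i it gathers the i-th element of every full-length group and checks they all match the first; B filters the full-length groups once and compares each whole group to the first by list equality, exploiting that full-length groups all have length max_group.
import Mathlib
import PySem

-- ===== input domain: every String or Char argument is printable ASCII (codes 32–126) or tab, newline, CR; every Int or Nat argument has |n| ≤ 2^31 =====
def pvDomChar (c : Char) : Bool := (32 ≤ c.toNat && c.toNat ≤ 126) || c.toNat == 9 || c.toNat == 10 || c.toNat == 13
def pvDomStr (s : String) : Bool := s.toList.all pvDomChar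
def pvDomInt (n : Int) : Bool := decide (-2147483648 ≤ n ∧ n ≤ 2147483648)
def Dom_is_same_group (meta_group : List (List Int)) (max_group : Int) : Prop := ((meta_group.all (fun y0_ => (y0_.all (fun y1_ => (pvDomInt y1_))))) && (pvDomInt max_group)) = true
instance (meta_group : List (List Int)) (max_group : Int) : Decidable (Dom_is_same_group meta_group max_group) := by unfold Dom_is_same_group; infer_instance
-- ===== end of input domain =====

-- B replaces A's column-by-column transposed scan with a single filter of the
-- full-length groups and a whole-list comparison against the first one (objective: simpler).

-- ===== PORT A =====
-- Python's `all(check_list[0] == cl for cl in check_list)` evaluates check_list[0]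
-- lazily, only when check_list is nonempty, so the pyGetD default is never the result.
def is_same_group (meta_group : List (List Int)) (max_group : Int) : Bool :=
  let check_bool_list : List Bool :=
    meta_group.foldl (fun acc group => acc ++ [decide ((group.length : Int) = max_group)]) []
  let check_equality : List Bool :=
    (PySem.List.pyRange 0 max_group 1).foldl (fun acc i =>
      let check_list : List Int :=
        (PySem.List.pyRange 0 (meta_group.length : Int) 1).foldl (fun cl j =>
          if PySem.List.pyGetD check_bool_list j false then
            cl ++ [PySem.List.pyGetD (PySem.List.pyGetD meta_group j []) i 0]
          else cl) []
      acc ++ [check_list.all (fun cl => PySem.List.pyGetD check_list 0 0 == cl)]) []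
  check_equality.all (fun b => b)

-- ===== PORT B =====
-- `all(g == full[0] for g in full)`: full[0] is evaluated lazily, only when full ≠ [].
def is_same_group_alt (meta_group : List (List Int)) (max_group : Int) : Bool :=
  let full := meta_group.filter (fun g => (g.length : Int) == max_group)
  match full with
  | [] => true
  | f :: _ => full.all (fun g => g == f)

-- ===== PRECONDITION & SPEC =====
def Spec_is_same_group (meta_group : List (List Int)) (max_group : Int) (out : Bool) : Prop := out = is_same_group_alt meta_group max_group
instance (meta_group : List (List Int)) (max_group : Int) (out : Bool) : Decidable (Spec_is_same_group meta_group max_group out) := by unfold Spec_is_same_group; infer_instance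

-- ===== CLAIM (what is proved, stated in full; the proofs are below) =====
def Claim_equal_is_same_group : Prop := ∀ (meta_group : List (List Int)) (max_group : Int), Dom_is_same_group meta_group max_group → Spec_is_same_group meta_group max_group (is_same_group meta_group max_group)

-- ===== LEMMAS AND PROOFS =====

-- The inner j-loop collects exactly the i-th entries of the full-length groups.
theorem check_list_eq (meta_group : List (List Int)) (max_group i : Int) :
    (PySem.List.pyRange 0 (meta_group.length : Int) 1).foldl (fun cl j =>
      if PySem.List.pyGetD (meta_group.foldl (fun acc group => acc ++ [decide ((group.length : Int) = max_group)]) []) j false then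
        cl ++ [PySem.List.pyGetD (PySem.List.pyGetD meta_group j []) i 0]
      else cl) [] =
    (meta_group.filter (fun g => (g.length : Int) == max_group)).map (fun g => PySem.List.pyGetD g i 0) := by
  rw [PySem.List.foldl_append_singleton_eq_map]
  rw [PySem.List.foldl_congr_mem (PySem.List.pyRange 0 (meta_group.length : Int) 1)
      _ (fun cl j => if decide (((PySem.List.pyGetD meta_group j []).length : Int) = max_group) then
            cl ++ [PySem.List.pyGetD (PySem.List.pyGetD meta_group j []) i 0] else cl) []
      (by
        intro acc j hj
        rw [PySem.List.mem_pyRange_one] at hj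
        have h1 : PySem.List.pyGetD ([] ++ meta_group.map (fun group => decide ((group.length : Int) = max_group))) j false
            = decide (((PySem.List.pyGetD meta_group j []).length : Int) = max_group) := by
          rw [List.nil_append,
            PySem.List.pyGetD_eq_getElem _ false hj.1 (by simpa using hj.2),
            PySem.List.pyGetD_eq_getElem _ [] hj.1 hj.2, List.getElem_map]
        rw [h1])]
  rw [PySem.List.foldl_pyRange_zero_pyGetD' meta_group []
      (fun cl g => if decide ((g.length : Int) = max_group) then cl ++ [PySem.List.pyGetD g i 0] else cl) []]
  rw [PySem.List.foldl_append_if (fun g => decide ((g.length : Int) = max_group))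
      (fun g => PySem.List.pyGetD g i 0) meta_group []]
  rw [List.nil_append]
  congr 1

theorem is_same_group_eq (meta_group : List (List Int)) (max_group : Int) :
    is_same_group meta_group max_group = is_same_group_alt meta_group max_group := by
  unfold is_same_group is_same_group_alt
  simp only [PySem.List.foldl_append_singleton_eq_map (l := PySem.List.pyRange 0 max_group 1),
    List.nil_append, List.all_map, check_list_eq]
  set full := meta_group.filter (fun g => (g.length : Int) == max_group) with hfull
  have hlen : ∀ g ∈ full, (g.length : Int) = max_group := by
    intro g hg
    have := List.of_mem_filter hg
    simpa using this
  cases hf : full with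
  | nil =>
    simp
  | cons f rest =>
    have hfl : (f.length : Int) = max_group := hlen f (by rw [hf]; exact List.mem_cons_self)
    rw [Bool.eq_iff_iff]
    simp only [List.all_eq_true, Function.comp, beq_iff_eq,
      PySem.List.mem_pyRange_one]
    constructor
    · intro h g hg
      have hgl : g.length = f.length := by
        have := hlen g (hf ▸ hg)
        omega
      symm
      apply List.ext_getElem hgl.symm
      intro k hk1 hk2
      have hkf : (k : Int) < max_group := by rw [← hfl]; exact_mod_cast hk1
      have := h (k : Int) ⟨Int.natCast_nonneg k, hkf⟩ g hg
      simp only [List.map_cons, PySem.List.pyGetD_zero_cons] at this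
      rw [PySem.List.pyGetD_eq_getElem f 0 (Int.natCast_nonneg k) (by exact_mod_cast hk1),
        PySem.List.pyGetD_eq_getElem g 0 (Int.natCast_nonneg k) (by exact_mod_cast hk2)] at this
      simpa using this
    · intro h i hi g hg
      rw [h g hg]
      simp [PySem.List.pyGetD_zero_cons]

-- ===== VERDICT (by name: the statement is the Claim_ definition above) =====
theorem is_same_group_spec : Claim_equal_is_same_group := by
  intro meta_group max_group _
  unfold Spec_is_same_group
  exact is_same_group_eq meta_group max_group
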